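-- pv_equiv track=rewrite | github.com/junyeong-nero/ps | programmers/simulation/행렬과연산.py | solution
-- ===== SOURCE A (Python) =====
-- from collections import deque
--
-- def solution(rc, operations):
--     n, m = len(rc), len(rc[0])
--
--     L = deque(row[0] for row in rc)
--     R = deque(row[-1] for row in rc)
--     M = deque(deque(row[1:-1]) for row in rc)  # m==2면 각 행이 빈 deque
--
--     def shift_row():
--         L.appendleft(L.pop())
--         R.appendleft(R.pop())
--         M.appendleft(M.pop())
--
--     def rotate():
--         if m == 2:
--             # O(1) perimeter rotate for 2 columns
--             x = L.popleft()
--             R.appendleft(x)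
--             y = R.pop()
--             L.append(y)
--             return
--
--         # m >= 3 : O(1)
--         M[0].appendleft(L.popleft())
--         R.appendleft(M[0].pop())
--         M[-1].append(R.pop())
--         L.append(M[-1].popleft())
--
--     for op in operations:
--         if op == "ShiftRow":
--             shift_row()
--         else:
--             rotate()
--
--     return [[L[i]] + list(M[i]) + [R[i]] for i in range(n)]
-- ===== SOURCE B (Python) =====
-- def solution(rc, operations):
--     mat = [list(row) for row in rc]
--     for op in operations:
--         if op == "ShiftRow":
--             mat = [mat[-1]] + mat[:-1]
--         else:
--             mat = _rotate(mat)
--     return mat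
--
--
-- def _rotate(mat):
--     # clockwise perimeter rotation, rebuilt row by row from the old matrix
--     n = len(mat)
--     top = [mat[1][0]] + mat[0][:-1]
--     bottom = mat[-1][1:] + [mat[-2][-1]]
--     mids = [[mat[i + 1][0]] + mat[i][1:-1] + [mat[i - 1][-1]]
--             for i in range(1, n - 1)]
--     return [top] + mids + [bottom]
-- ===== Notes on version B (the rewrite author's own statement) =====
-- stated objective: simpler
-- what changed: B keeps the matrix as whole rows and rebuilds the rotated border row-by-row from the old matrix on each Rotate (ShiftRow moves the last row to the front), instead of A's three persistent first-column/middle/last-column deques with O(1) pointer surgery per operation and a final reassembly.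
-- outside the precondition, e.g. on solution([[1, 2, 3]], ['Rotate']): A returns [[1, 3, 2]], B raises IndexError; on solution([[1], [2], [3]], ['Rotate']): A returns [[2, 1], [3, 1], [3, 2]], B returns [[2], [3, 1], [2]]; on solution([[1, 2], [3, 4, 5]], ['Rotate']): A returns [[3, 1], [5, 4, 2]], B returns [[3, 1], [4, 5, 2]]
import Mathlib
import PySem

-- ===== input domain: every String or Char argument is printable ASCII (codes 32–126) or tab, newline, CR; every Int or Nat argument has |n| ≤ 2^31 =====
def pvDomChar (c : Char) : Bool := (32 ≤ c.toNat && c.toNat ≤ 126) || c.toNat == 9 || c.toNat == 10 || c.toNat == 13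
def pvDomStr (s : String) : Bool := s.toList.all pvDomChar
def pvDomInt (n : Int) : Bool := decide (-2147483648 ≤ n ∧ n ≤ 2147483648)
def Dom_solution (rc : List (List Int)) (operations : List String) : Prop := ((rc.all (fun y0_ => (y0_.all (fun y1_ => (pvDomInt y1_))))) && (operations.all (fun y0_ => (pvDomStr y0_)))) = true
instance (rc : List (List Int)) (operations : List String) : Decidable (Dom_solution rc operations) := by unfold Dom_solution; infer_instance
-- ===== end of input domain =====

-- B is a plainer rewrite: it keeps the matrix as whole rows and rebuilds them on each
-- Rotate, instead of A's three persistent L/M/R deques; return-value equivalence only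
-- (neither version mutates its arguments observably).

-- ===== PORT A =====
-- deque.appendleft(deque.pop()) on each of L, M, R
def pyShiftAll (L : List Int) (M : List (List Int)) (R : List Int) :
    List Int × List (List Int) × List Int :=
  (L.getLastD 0 :: L.dropLast, M.getLastD [] :: M.dropLast, R.getLastD 0 :: R.dropLast)

-- rotate() for m == 2
def pyRotate2 (L : List Int) (M : List (List Int)) (R : List Int) :
    List Int × List (List Int) × List Int :=
  let x := L.headD 0            -- x = L.popleft()
  let L1 := L.tail
  let R1 := x :: R              -- R.appendleft(x)
  let y := R1.getLastD 0        -- y = R.pop()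
  let R2 := R1.dropLast
  (L1 ++ [y], M, R2)            -- L.append(y)

-- rotate() for m >= 3
def pyRotate3 (L : List Int) (M : List (List Int)) (R : List Int) :
    List Int × List (List Int) × List Int :=
  let M0 := L.headD 0 :: M.headD []     -- M[0].appendleft(L.popleft())
  let L1 := L.tail
  let R1 := M0.getLastD 0 :: R          -- R.appendleft(M[0].pop())
  let M1 := M0.dropLast :: M.tail
  let Ml := M1.getLastD [] ++ [R1.getLastD 0]  -- M[-1].append(R.pop())
  let R2 := R1.dropLast
  let M2 := M1.dropLast ++ [Ml]
  let L2 := L1 ++ [Ml.headD 0]          -- L.append(M[-1].popleft())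
  let M3 := M2.dropLast ++ [Ml.tail]
  (L2, M3, R2)

def pyStepA (m : Nat) (s : List Int × List (List Int) × List Int) (op : String) :
    List Int × List (List Int) × List Int :=
  if op = "ShiftRow" then pyShiftAll s.1 s.2.1 s.2.2
  else if m = 2 then pyRotate2 s.1 s.2.1 s.2.2
  else pyRotate3 s.1 s.2.1 s.2.2

def solution (rc : List (List Int)) (operations : List String) : List (List Int) :=
  let n := rc.length
  let m := (rc.headD []).length
  let L := rc.map (fun row => row.headD 0)        -- row[0]
  let R := rc.map (fun row => row.getLastD 0)     -- row[-1]
  let M := rc.map (fun row => row.tail.dropLast)  -- row[1:-1]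
  let fin := operations.foldl (pyStepA m) (L, M, R)
  (List.range n).map (fun i => fin.1.getD i 0 :: (fin.2.1.getD i [] ++ [fin.2.2.getD i 0]))

-- ===== PORT B =====
-- _rotate: clockwise perimeter rotation rebuilt row by row from the old matrix
def rotByRows (mat : List (List Int)) : List (List Int) :=
  let n := mat.length
  let top := (mat.getD 1 []).headD 0 :: (mat.headD []).dropLast
  let bottom := (mat.getLastD []).tail ++ [(mat.getD (n - 2) []).getLastD 0]
  let mids := (List.range' 1 (n - 2)).map (fun i =>
    (mat.getD (i + 1) []).headD 0 ::
      ((mat.getD i []).tail.dropLast ++ [(mat.getD (i - 1) []).getLastD 0]))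
  top :: (mids ++ [bottom])

def pyStepB (mat : List (List Int)) (op : String) : List (List Int) :=
  if op = "ShiftRow" then mat.getLastD [] :: mat.dropLast else rotByRows mat

def solution_alt (rc : List (List Int)) (operations : List String) : List (List Int) :=
  operations.foldl pyStepB rc

-- ===== PRECONDITION & SPEC =====
-- Pre_ admits the problem's natural domain: a rectangular matrix with at least 2 rows and
-- 2 columns; when the operations perform no rotation, any nonempty matrix whose rows all
-- have at least 2 entries is admitted as well. Excluded inputs on which A still returns a
-- value: rotations of single-row, width-1 or ragged matrices, where A's first/middle/last
-- column decomposition yields accidental values no one would specify (B raises on the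
-- single-row case).
def Pre_solution (rc : List (List Int)) (operations : List String) : Prop :=
  rc ≠ [] ∧ (∀ r ∈ rc, 2 ≤ r.length) ∧
    ((2 ≤ rc.length ∧ ∀ r ∈ rc, r.length = (rc.headD []).length) ∨
      (∀ op ∈ operations, op = "ShiftRow"))
instance (rc : List (List Int)) (operations : List String) : Decidable (Pre_solution rc operations) := by unfold Pre_solution; infer_instance

def pvWitness_solution : List (List Int) × List String :=
  ([[1, 2], [3, 4]], ["ShiftRow", "Rotate"])

def Spec_solution (rc : List (List Int)) (operations : List String) (out : List (List Int)) : Prop := out = solution_alt rc operations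
instance (rc : List (List Int)) (operations : List String) (out : List (List Int)) : Decidable (Spec_solution rc operations out) := by unfold Spec_solution; infer_instance

-- ===== CLAIM (what is proved, stated in full; the proofs are below) =====
def Claim_equal_solution : Prop := ∀ (rc : List (List Int)) (operations : List String), Dom_solution rc operations → Pre_solution rc operations → Spec_solution rc operations (solution rc operations)

-- ===== LEMMAS AND PROOFS =====

def rowHd (r : List Int) : Int := r.headD 0
def rowLst (r : List Int) : Int := r.getLastD 0
def rowMid (r : List Int) : List Int := r.tail.dropLast

def Shape (m : Nat) (mat : List (List Int)) : Prop :=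
  2 ≤ mat.length ∧ ∀ r ∈ mat, r.length = m

-- small rewriting helpers for cons/append normal forms
theorem getLastD_concat' {alpha : Type} (l : List alpha) (z d : alpha) :
    (l ++ [z]).getLastD d = z := by
  rw [List.getLastD_eq_getLast?, List.getLast?_concat]; rfl

theorem getLastD_cons' {alpha : Type} (x : alpha) (l : List alpha) (d : alpha) :
    (x :: l).getLastD d = l.getLastD x := by
  cases l with
  | nil => rfl
  | cons a t => rfl

theorem getLastD_cc {alpha : Type} (x : alpha) (l : List alpha) (z d : alpha) :
    (x :: (l ++ [z])).getLastD d = z := by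
  rw [getLastD_cons', getLastD_concat']

theorem dropLast_cc {alpha : Type} (x : alpha) (l : List alpha) (z : alpha) :
    (x :: (l ++ [z])).dropLast = x :: l := by
  rw [← List.cons_append, List.dropLast_concat]

theorem dropLast_ccc {alpha : Type} (x y : alpha) (l : List alpha) (z : alpha) :
    (x :: y :: (l ++ [z])).dropLast = x :: y :: l := by
  rw [← List.cons_append, ← List.cons_append, List.dropLast_concat]

theorem headD_append_ne {alpha : Type} {l : List alpha} (h : l ≠ []) (t : List alpha) (d : alpha) :
    (l ++ t).headD d = l.headD d := by
  cases l with
  | nil => exact absurd rfl h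
  | cons a u => rfl

theorem tail_dropLast_concat {alpha : Type} (l : List alpha) (x : alpha) :
    (l ++ [x]).tail.dropLast = l.tail := by
  cases l with
  | nil => rfl
  | cons a u => simp [List.dropLast_concat]

theorem getD_mid' {alpha : Type} (x : alpha) (l : List alpha) (y d : alpha) (j : Nat)
    (h : j < l.length) : (x :: (l ++ [y])).getD (j + 1) d = l[j] := by
  rw [List.getD_cons_succ, List.getD_eq_getElem _ _ (by simp <;> omega),
    List.getElem_append_left h]

theorem getD_last' {alpha : Type} (x : alpha) (l : List alpha) (y d : alpha) :
    (x :: (l ++ [y])).getD (l.length + 1) d = y := by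
  rw [List.getD_cons_succ, List.getD_eq_getElem _ _ (by simp),
    List.getElem_append_right (by omega)]
  simp

theorem two_le_decomp {alpha : Type} {l : List alpha} (h : 2 ≤ l.length) :
    ∃ a t b, l = a :: (t ++ [b]) := by
  match l, h with
  | a :: b :: t, _ =>
    obtain ⟨l', c, e⟩ := (List.eq_nil_or_concat' (b :: t)).resolve_left (by simp)
    exact ⟨a, l', c, by rw [e]⟩

theorem row_recomp {r : List Int} (h : 2 ≤ r.length) :
    rowHd r :: (rowMid r ++ [rowLst r]) = r := by
  obtain ⟨a, t, b, rfl⟩ := two_le_decomp h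
  simp only [rowHd, rowMid, rowLst, List.headD_cons, List.tail_cons, List.dropLast_concat,
    getLastD_cc]

-- closed forms of a once-rotated matrix, rows decomposed as first :: (middle ++ [last])
def hdF (b : Int) (bs : List Int) (b' : Int) (body : List (List Int)) : List Int :=
  body.map rowHd ++ [b, (bs ++ [b']).headD 0]
def midF (a : Int) (as : List Int) (bs : List Int) (b' : Int) (body : List (List Int)) :
    List (List Int) :=
  (a :: as).dropLast :: (body.map rowMid ++ [(bs ++ [b']).tail])
def lstF (a a' : Int) (as : List Int) (body : List (List Int)) : List Int :=
  as.getLastD a :: a' :: body.map rowLst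

theorem rotA3_form (a a' b b' : Int) (as bs : List Int) (body : List (List Int)) :
    pyRotate3 (((a :: (as ++ [a'])) :: (body ++ [b :: (bs ++ [b'])])).map rowHd)
              (((a :: (as ++ [a'])) :: (body ++ [b :: (bs ++ [b'])])).map rowMid)
              (((a :: (as ++ [a'])) :: (body ++ [b :: (bs ++ [b'])])).map rowLst)
      = (hdF b bs b' body, midF a as bs b' body, lstF a a' as body) := by
  simp only [pyRotate3, hdF, midF, lstF, List.map_cons, List.map_append, rowHd, rowMid, rowLst,
    List.headD_cons, List.tail_cons, List.dropLast_concat, getLastD_cc, getLastD_cons',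
    getLastD_concat', dropLast_cc, dropLast_ccc, List.cons_append, List.nil_append,
    List.map_nil]
  simp [Prod.ext_iff, getLastD_concat', dropLast_ccc, getLastD_cons']

theorem rotA2_form (a a' b b' : Int) (body : List (List Int)) :
    pyRotate2 (((a :: ([] ++ [a'])) :: (body ++ [b :: ([] ++ [b'])])).map rowHd)
              (((a :: ([] ++ [a'])) :: (body ++ [b :: ([] ++ [b'])])).map rowMid)
              (((a :: ([] ++ [a'])) :: (body ++ [b :: ([] ++ [b'])])).map rowLst)
      = (hdF b [] b' body, midF a [] [] b' body, lstF a a' [] body) := by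
  simp only [pyRotate2, hdF, midF, lstF, List.map_cons, List.map_append, rowHd, rowMid, rowLst,
    List.headD_cons, List.tail_cons, List.dropLast_concat, getLastD_cc, getLastD_cons',
    getLastD_concat', dropLast_cc, dropLast_ccc, List.cons_append, List.nil_append,
    List.map_nil]
  simp [Prod.ext_iff, getLastD_concat', dropLast_ccc, getLastD_cons']

theorem list_eq_of_getD {alpha : Type} (d : alpha) (l1 l2 : List alpha)
    (hlen : l1.length = l2.length)
    (h : ∀ i, i < l1.length → l1.getD i d = l2.getD i d) : l1 = l2 := by
  apply List.ext_getElem hlen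
  intro i h1 h2
  rw [← List.getD_eq_getElem l1 d h1, ← List.getD_eq_getElem l2 d h2]
  exact h i h1

theorem getD_append_lt {alpha : Type} (l1 l2 : List alpha) (d : alpha) (i : Nat)
    (h : i < l1.length) : (l1 ++ l2).getD i d = l1.getD i d := by
  rw [List.getD_eq_getElem _ _ (by simp <;> omega), List.getElem_append_left h,
    List.getD_eq_getElem _ _ h]

theorem getD_append_ge {alpha : Type} (l1 l2 : List alpha) (d : alpha) (i : Nat)
    (h : l1.length ≤ i) : (l1 ++ l2).getD i d = l2.getD (i - l1.length) d := by
  by_cases h2 : i < l1.length + l2.length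
  · rw [List.getD_eq_getElem _ _ (by simp <;> omega), List.getElem_append_right (by omega),
      List.getD_eq_getElem _ _ (by omega)]
  · rw [List.getD_eq_default _ _ (by simp <;> omega), List.getD_eq_default _ _ (by omega)]

theorem getD_map_range'' {alpha : Type} (g : Nat → alpha) (k j : Nat) (d : alpha)
    (h : j < k) : ((List.range' 1 k).map g).getD j d = g (j + 1) := by
  rw [List.getD_eq_getElem _ _ (by simp <;> omega), List.getElem_map, List.getElem_range']
  congr 1
  omega

theorem getD_map'' {alpha beta : Type} (f : alpha → beta) (l : List alpha) (i : Nat)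
    (d : beta) (d' : alpha) (h : i < l.length) : (l.map f).getD i d = f (l.getD i d') := by
  rw [List.getD_eq_getElem _ _ (by simp <;> omega), List.getElem_map,
    List.getD_eq_getElem _ _ h]

theorem rotB_expand (a a' b b' : Int) (as bs : List Int) (body : List (List Int)) :
    rotByRows ((a :: (as ++ [a'])) :: (body ++ [b :: (bs ++ [b'])]))
      = ((((a :: (as ++ [a'])) :: (body ++ [b :: (bs ++ [b'])])).getD 1 []).headD 0 :: (a :: as))
          :: (((List.range' 1 body.length).map (fun i =>
                (((a :: (as ++ [a'])) :: (body ++ [b :: (bs ++ [b'])])).getD (i + 1) []).headD 0 ::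
                  ((((a :: (as ++ [a'])) :: (body ++ [b :: (bs ++ [b'])])).getD i []).tail.dropLast ++ [(((a :: (as ++ [a'])) :: (body ++ [b :: (bs ++ [b'])])).getD (i - 1) []).getLastD 0])))
              ++ [(bs ++ [b']) ++ [(((a :: (as ++ [a'])) :: (body ++ [b :: (bs ++ [b'])])).getD body.length []).getLastD 0]]) := by
  have hl2 : ((a :: (as ++ [a'])) :: (body ++ [b :: (bs ++ [b'])])).length - 2 = body.length := by simp
  simp only [rotByRows]
  rw [hl2]
  simp only [List.headD_cons, getLastD_cc, List.tail_cons, dropLast_cc]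

theorem getD_one_case (a a' b b' : Int) (as bs : List Int) (body : List (List Int)) :
    ((a :: (as ++ [a'])) :: (body ++ [b :: (bs ++ [b'])])).getD 1 [] = body.headD (b :: (bs ++ [b'])) := by
  rcases body with _ | ⟨r, rs⟩
  · simpa using getD_last' (a :: (as ++ [a'])) ([] : List (List Int)) (b :: (bs ++ [b'])) []
  · simpa using getD_mid' (a :: (as ++ [a'])) (r :: rs) (b :: (bs ++ [b'])) [] 0 (by simp)

theorem rotB_hd (a a' b b' : Int) (as bs : List Int) (body : List (List Int)) :
    (rotByRows ((a :: (as ++ [a'])) :: (body ++ [b :: (bs ++ [b'])]))).map rowHd = hdF b bs b' body := by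
  rw [rotB_expand]
  refine list_eq_of_getD 0 _ _ (by simp [hdF]) ?_
  intro i hi
  simp only [List.length_map, List.length_cons, List.length_append,
    List.length_range', List.length_nil] at hi
  rw [getD_map'' rowHd _ _ _ [] (by simp <;> omega)]
  rcases i with _ | j
  · simp only [List.getD_cons_zero]
    simp only [rowHd, List.headD_cons, getD_one_case, hdF]
    rcases body with _ | ⟨r, rs⟩
    · simp
    · rw [getD_append_lt _ _ _ _ (by simp), getD_map'' rowHd _ _ _ [] (by simp)]
      simp [rowHd]
  · simp only [List.getD_cons_succ]
    by_cases hj : j < body.length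
    · rw [getD_append_lt _ _ _ _ (by simpa using hj), getD_map_range'' _ _ _ _ hj]
      simp only [rowHd, List.headD_cons, List.getD_cons_succ, hdF]
      by_cases hjl : j + 1 < body.length
      · rw [getD_append_lt _ _ _ _ hjl, getD_append_lt _ _ _ _ (by simpa using hjl),
          getD_map'' rowHd _ _ _ [] hjl]
        rfl
      · have hj1 : j + 1 = body.length := by omega
        have e1 : ((body ++ [b :: (bs ++ [b'])]).getD (j + 1) []).headD 0 = b := by
          rw [hj1, getD_append_ge body [b :: (bs ++ [b'])] [] body.length le_rfl,
            Nat.sub_self]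
          rfl
        have e2 : (List.map rowHd body ++ [b, (bs ++ [b']).headD 0]).getD (j + 1) 0 = b := by
          rw [getD_append_ge (List.map rowHd body) [b, (bs ++ [b']).headD 0] 0 (j + 1)
              (by simp <;> omega),
            show j + 1 - (List.map rowHd body).length = 0 from by simp <;> omega]
          rfl
        rw [e1, e2]
    · have hje : j = body.length := by omega
      rw [getD_append_ge _ _ _ _ (by simp <;> omega)]
      simp only [List.length_map, List.length_range']
      rw [hje, Nat.sub_self]
      simp only [List.getD_cons_zero, rowHd]
      rw [headD_append_ne (show bs ++ [b'] ≠ [] from by simp)]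
      simp only [hdF]
      rw [getD_append_ge _ _ _ _ (by simp <;> omega)]
      simp only [List.length_map]
      rw [show body.length + 1 - body.length = 1 from by omega]
      rfl

theorem rotB_mid (a a' b b' : Int) (as bs : List Int) (body : List (List Int)) :
    (rotByRows ((a :: (as ++ [a'])) :: (body ++ [b :: (bs ++ [b'])]))).map rowMid = midF a as bs b' body := by
  rw [rotB_expand]
  refine list_eq_of_getD [] _ _ (by simp [midF]) ?_
  intro i hi
  simp only [List.length_map, List.length_cons, List.length_append,
    List.length_range', List.length_nil] at hi
  rw [getD_map'' rowMid _ _ _ [] (by simp <;> omega)]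
  rcases i with _ | j
  · simp [rowMid, midF]
  · simp only [List.getD_cons_succ]
    simp only [midF, List.getD_cons_succ]
    by_cases hj : j < body.length
    · rw [getD_append_lt _ _ _ _ (by simpa using hj), getD_map_range'' _ _ _ _ hj]
      simp only [rowMid, List.tail_cons, List.dropLast_concat, List.getD_cons_succ]
      rw [getD_append_lt _ _ _ _ hj, getD_append_lt _ _ _ _ (by simpa using hj),
        getD_map'' rowMid _ _ _ [] hj]
      rfl
    · have hje : j = body.length := by omega
      rw [getD_append_ge _ _ _ _ (by simp <;> omega), getD_append_ge _ _ _ _ (by simp <;> omega)]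
      simp only [List.length_map, List.length_range']
      rw [hje, Nat.sub_self]
      simp only [List.getD_cons_zero, rowMid, tail_dropLast_concat]

theorem rotB_lst (a a' b b' : Int) (as bs : List Int) (body : List (List Int)) :
    (rotByRows ((a :: (as ++ [a'])) :: (body ++ [b :: (bs ++ [b'])]))).map rowLst = lstF a a' as body := by
  rw [rotB_expand]
  refine list_eq_of_getD 0 _ _ (by simp [lstF]) ?_
  intro i hi
  simp only [List.length_map, List.length_cons, List.length_append,
    List.length_range', List.length_nil] at hi
  rw [getD_map'' rowLst _ _ _ [] (by simp <;> omega)]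
  rcases i with _ | j
  · simp only [List.getD_cons_zero, rowLst, getLastD_cons', lstF]
  · simp only [List.getD_cons_succ]
    simp only [lstF, List.getD_cons_succ]
    by_cases hj : j < body.length
    · rw [getD_append_lt _ _ _ _ (by simpa using hj), getD_map_range'' _ _ _ _ hj]
      simp only [rowLst, getLastD_cons', getLastD_concat', Nat.add_sub_cancel]
      rcases j with _ | k
      · simp only [List.getD_cons_zero, getLastD_cc]
      · simp only [List.getD_cons_succ]
        rw [getD_append_lt _ _ _ _ (by omega), getD_map'' rowLst _ _ _ [] (by omega)]
        rfl
    · have hje : j = body.length := by omega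
      rw [getD_append_ge _ _ _ _ (by simp <;> omega)]
      simp only [List.length_map, List.length_range']
      rw [hje, Nat.sub_self]
      simp only [List.getD_cons_zero, rowLst, getLastD_concat']
      rcases (List.eq_nil_or_concat' body) with rfl | ⟨l, c, rfl⟩
      · simp only [List.length_nil, List.getD_cons_zero]
        exact getLastD_cc _ _ _ _
      · rw [show (l ++ [c]).length = l.length + 1 from by simp]
        simp only [List.getD_cons_succ]
        rw [getD_append_lt (l ++ [c]) [b :: (bs ++ [b'])] [] l.length (by simp),
          getD_append_ge l [c] [] l.length le_rfl, Nat.sub_self,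
          getD_map'' rowLst (l ++ [c]) l.length 0 [] (by simp),
          getD_append_ge l [c] [] l.length le_rfl, Nat.sub_self]
        rfl

theorem shape_shift {m : Nat} {mat : List (List Int)} (h : Shape m mat) :
    Shape m (mat.getLastD [] :: mat.dropLast) ∧
      (mat.getLastD [] :: mat.dropLast).length = mat.length := by
  obtain ⟨hn, hr⟩ := h
  obtain ⟨l, c, rfl⟩ := (List.eq_nil_or_concat' mat).resolve_left (by rintro rfl; simp at hn)
  rw [getLastD_concat', List.dropLast_concat]
  refine ⟨⟨by simpa using hn, ?_⟩, by simp⟩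
  intro r hrm
  rcases List.mem_cons.mp hrm with rfl | hrm
  · exact hr _ (by simp)
  · exact hr _ (by simp [hrm])

theorem rows_decomp {m : Nat} {mat : List (List Int)} (hm : 2 ≤ m) (h : Shape m mat) :
    ∃ a a' b b' as bs body,
      mat = (a :: (as ++ [a'])) :: (body ++ [b :: (bs ++ [b'])])
        ∧ as.length = m - 2 ∧ bs.length = m - 2 := by
  obtain ⟨hn, hr⟩ := h
  obtain ⟨r0, body, rl, rfl⟩ := two_le_decomp hn
  have h0 : 2 ≤ r0.length := by rw [hr r0 (by simp)]; omega
  have hl : 2 ≤ rl.length := by rw [hr rl (by simp)]; omega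
  obtain ⟨a, as, a', e0⟩ := two_le_decomp h0
  obtain ⟨b, bs, b', el⟩ := two_le_decomp hl
  refine ⟨a, a', b, b', as, bs, body, by rw [← e0, ← el], ?_, ?_⟩
  · have := hr r0 (by simp); rw [e0] at this; simp at this; omega
  · have := hr rl (by simp); rw [el] at this; simp at this; omega

theorem shape_rot {m : Nat} {mat : List (List Int)} (hm : 2 ≤ m) (h : Shape m mat) :
    Shape m (rotByRows mat) ∧ (rotByRows mat).length = mat.length := by
  obtain ⟨a, a', b, b', as, bs, body, rfl, has, hbs⟩ := rows_decomp hm h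
  rw [rotB_expand]
  refine ⟨⟨by simp, ?_⟩, by simp⟩
  intro r hrm
  rcases List.mem_cons.mp hrm with rfl | hrm
  · simp; omega
  · rcases List.mem_append.mp hrm with hrm | hrm
    · obtain ⟨i, hi, rfl⟩ := List.mem_map.mp hrm
      have hib := List.mem_range'_1.mp hi
      have hget : ((a :: (as ++ [a'])) :: (body ++ [b :: (bs ++ [b'])])).getD i [] = body[i - 1]'(by omega) := by
        have := getD_mid' (a :: (as ++ [a'])) body (b :: (bs ++ [b'])) [] (i - 1) (by omega)
        rw [show i - 1 + 1 = i by omega] at this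
        exact this
      have hlen : (((a :: (as ++ [a'])) :: (body ++ [b :: (bs ++ [b'])])).getD i []).length = m := by
        rw [hget]
        exact h.2 _ (by
          have : body[i - 1]'(by omega) ∈ body := List.getElem_mem _
          simp [this])
      simp only [List.length_cons, List.length_append, List.length_dropLast,
        List.length_tail, List.length_nil, hlen]
      omega
    · rw [List.mem_singleton.mp hrm]
      simp; omega

theorem corr_shift {mat : List (List Int)} (h : mat ≠ []) :
    pyShiftAll (mat.map rowHd) (mat.map rowMid) (mat.map rowLst)
      = ((mat.getLastD [] :: mat.dropLast).map rowHd,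
         (mat.getLastD [] :: mat.dropLast).map rowMid,
         (mat.getLastD [] :: mat.dropLast).map rowLst) := by
  obtain ⟨l, c, rfl⟩ := (List.eq_nil_or_concat' mat).resolve_left h
  simp only [pyShiftAll, List.map_append, List.map_cons, List.map_nil, getLastD_concat',
    List.dropLast_concat, List.getLastD_eq_getLast?, List.getLast?_concat, Option.getD_some]

theorem corr_rot2 {mat : List (List Int)} (h : Shape 2 mat) :
    pyRotate2 (mat.map rowHd) (mat.map rowMid) (mat.map rowLst)
      = ((rotByRows mat).map rowHd, (rotByRows mat).map rowMid,
         (rotByRows mat).map rowLst) := by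
  obtain ⟨a, a', b, b', as, bs, body, rfl, has, hbs⟩ := rows_decomp (by omega) h
  have has' : as = [] := List.length_eq_zero_iff.mp (by omega)
  have hbs' : bs = [] := List.length_eq_zero_iff.mp (by omega)
  subst has' hbs'
  rw [rotA2_form, rotB_hd, rotB_mid, rotB_lst]

theorem corr_rot3 {m : Nat} {mat : List (List Int)} (hm : 2 ≤ m) (h : Shape m mat) :
    pyRotate3 (mat.map rowHd) (mat.map rowMid) (mat.map rowLst)
      = ((rotByRows mat).map rowHd, (rotByRows mat).map rowMid,
         (rotByRows mat).map rowLst) := by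
  obtain ⟨a, a', b, b', as, bs, body, rfl, has, hbs⟩ := rows_decomp hm h
  rw [rotA3_form, rotB_hd, rotB_mid, rotB_lst]

theorem loop_corr (m : Nat) (hm : 2 ≤ m) :
    ∀ (ops : List String) (mat : List (List Int)), Shape m mat →
      ops.foldl (pyStepA m) (mat.map rowHd, mat.map rowMid, mat.map rowLst)
        = ((ops.foldl pyStepB mat).map rowHd, (ops.foldl pyStepB mat).map rowMid,
           (ops.foldl pyStepB mat).map rowLst)
      ∧ Shape m (ops.foldl pyStepB mat) ∧ (ops.foldl pyStepB mat).length = mat.length := by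
  intro ops
  induction ops with
  | nil => exact fun mat h => ⟨rfl, h, rfl⟩
  | cons op ops ih =>
    intro mat h
    have hne : mat ≠ [] := by intro e; rw [e] at h; simpa using h.1
    rw [List.foldl_cons, List.foldl_cons]
    by_cases hop : op = "ShiftRow"
    · have hstep : pyStepA m (mat.map rowHd, mat.map rowMid, mat.map rowLst) op
          = ((pyStepB mat op).map rowHd, (pyStepB mat op).map rowMid,
             (pyStepB mat op).map rowLst) := by
        simp only [pyStepA, pyStepB, hop, if_pos rfl]
        exact corr_shift hne
      have hsh := shape_shift (m := m) h
      rw [hstep]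
      have hps : pyStepB mat op = mat.getLastD [] :: mat.dropLast := by
        simp [pyStepB, hop]
      rw [hps] at *
      obtain ⟨h1, h2, h3⟩ := ih _ hsh.1
      exact ⟨h1, h2, by rw [h3, hsh.2]⟩
    · have hps : pyStepB mat op = rotByRows mat := by simp [pyStepB, hop]
      have hstep : pyStepA m (mat.map rowHd, mat.map rowMid, mat.map rowLst) op
          = ((pyStepB mat op).map rowHd, (pyStepB mat op).map rowMid,
             (pyStepB mat op).map rowLst) := by
        by_cases hm2 : m = 2
        · subst hm2
          simp only [pyStepA, if_neg hop, if_pos rfl, hps]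
          exact corr_rot2 h
        · simp only [pyStepA, if_neg hop, if_neg hm2, hps]
          exact corr_rot3 hm h
      have hsh := shape_rot hm h
      rw [hstep, hps] at *
      obtain ⟨h1, h2, h3⟩ := ih _ hsh.1
      exact ⟨h1, h2, by rw [h3, hsh.2]⟩

theorem getLastD_mem {mat : List (List Int)} (h : mat ≠ []) : mat.getLastD [] ∈ mat := by
  obtain ⟨l, c, rfl⟩ := (List.eq_nil_or_concat' mat).resolve_left h
  rw [getLastD_concat']
  simp

theorem loop_shift (m : Nat) :
    ∀ (ops : List String) (mat : List (List Int)), (∀ op ∈ ops, op = "ShiftRow") →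
      mat ≠ [] →
      ops.foldl (pyStepA m) (mat.map rowHd, mat.map rowMid, mat.map rowLst)
        = ((ops.foldl pyStepB mat).map rowHd, (ops.foldl pyStepB mat).map rowMid,
           (ops.foldl pyStepB mat).map rowLst)
      ∧ (∀ r ∈ ops.foldl pyStepB mat, r ∈ mat)
      ∧ (ops.foldl pyStepB mat).length = mat.length := by
  intro ops
  induction ops with
  | nil => exact fun mat _ _ => ⟨rfl, fun r hr => hr, rfl⟩
  | cons op ops ih =>
    intro mat hops hne
    have hop : op = "ShiftRow" := hops op (by simp)
    rw [List.foldl_cons, List.foldl_cons]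
    have hstep : pyStepA m (mat.map rowHd, mat.map rowMid, mat.map rowLst) op
        = ((pyStepB mat op).map rowHd, (pyStepB mat op).map rowMid,
           (pyStepB mat op).map rowLst) := by
      simp only [pyStepA, pyStepB, hop, if_pos rfl]
      exact corr_shift hne
    have hps : pyStepB mat op = mat.getLastD [] :: mat.dropLast := by simp [pyStepB, hop]
    rw [hstep]
    rw [hps] at *
    obtain ⟨h1, h2, h3⟩ := ih (mat.getLastD [] :: mat.dropLast)
      (fun o ho => hops o (by simp [ho])) (by simp)
    refine ⟨h1, ?_, by
      rw [h3]
      cases mat with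
      | nil => exact absurd rfl hne
      | cons x t => simp⟩
    intro r hr
    rcases List.mem_cons.mp (h2 r hr) with rfl | hrm
    · exact getLastD_mem hne
    · exact List.dropLast_subset _ hrm

theorem recon {mat : List (List Int)}
    (h : ∀ r ∈ mat, 2 ≤ r.length) :
    (List.range mat.length).map (fun i =>
        (mat.map rowHd).getD i 0 :: ((mat.map rowMid).getD i [] ++ [(mat.map rowLst).getD i 0]))
      = mat := by
  apply List.ext_getElem
  · simp
  · intro i h1 h2
    simp only [List.getElem_map, List.getElem_range]
    have hi : i < mat.length := by simpa using h2
    rw [List.getD_eq_getElem _ _ (by simpa using hi), List.getD_eq_getElem _ _ (by simpa using hi),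
      List.getD_eq_getElem _ _ (by simpa using hi)]
    simp only [List.getElem_map]
    exact row_recomp (h mat[i] (List.getElem_mem hi))

-- ===== VERDICT (by name: the statement is the Claim_ definition above) =====

theorem solution_spec : Claim_equal_solution := by
  intro rc operations _hdom hpre
  obtain ⟨hne, h2, hbranch⟩ := hpre
  show solution rc operations = solution_alt rc operations
  unfold solution solution_alt
  have e1 : (fun row : List Int => row.headD 0) = rowHd := rfl
  have e2 : (fun row : List Int => row.tail.dropLast) = rowMid := rfl
  have e3 : (fun row : List Int => row.getLastD 0) = rowLst := rfl
  simp only [e1, e2, e3]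
  rcases hbranch with ⟨hn, hrect⟩ | hshift
  · have hm : 2 ≤ (rc.headD []).length := by
      cases rc with
      | nil => exact absurd rfl hne
      | cons r0 rest => exact h2 r0 (by simp)
    obtain ⟨hfold, hsh, hlen⟩ := loop_corr _ hm operations rc ⟨hn, hrect⟩
    rw [hfold, ← hlen]
    exact recon (fun r hr => by rw [hsh.2 r hr]; omega)
  · obtain ⟨hfold, hmem, hlen⟩ := loop_shift ((rc.headD []).length) operations rc hshift hne
    rw [hfold, ← hlen]
    exact recon (fun r hr => h2 r (hmem r hr))
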